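-- pv_equiv track=rewrite | github.com/barseghyanartur/itnpy | src/itnpy/itn.py | _inverse_normalize_classes
-- ===== SOURCE A (Python) =====
-- from typing import List, Union
--
-- BACKGROUND_CLASS = "self"
--
-- def group_tokens(tokens: List[str], mask: List[int]) -> List[dict]:
--     groups = []
--     start = 0
--
--     for i, _ in enumerate(tokens):
--         if i:
--             if value != mask[i]:
--                 groups.append({value: tokens[start:i]})
--                 start = i
--
--         value = mask[i]
--
--     if tokens:
--         groups.append({value: tokens[start : i + 1]})
--
--     return groups
--
-- def _inverse_normalize_classes(
--     spoken_tokens: List[str], word2class: dict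
-- ) -> List[List[str]]:
--     mask = [True if token in word2class else False for token in spoken_tokens]
--     groups = group_tokens(spoken_tokens, mask)
--     groups = [
--         [word2class[t] for t in v] if k else [BACKGROUND_CLASS for _ in v]
--         for group in groups
--         for k, v in group.items()
--     ]
--     return groups
-- ===== SOURCE B (Python) =====
-- BACKGROUND_CLASS = "self"
--
-- def _inverse_normalize_classes(spoken_tokens, word2class):
--     groups = []
--     prev = None
--     for token in reversed(spoken_tokens):
--         member = token in word2class
--         cls = word2class[token] if member else BACKGROUND_CLASS
--         if prev is not None and member == prev:
--             groups[0].insert(0, cls)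
--         else:
--             groups.insert(0, [cls])
--         prev = member
--     return groups
-- ===== Notes on version B (the rewrite author's own statement) =====
-- stated objective: alternative
-- what changed: Replaces A's three stages (mask list, index/slice grouping helper, post-hoc mapping of each run) with one backward pass that maps each token to its class immediately and prepends it to the head group, starting a new group whenever membership changes.
import Mathlib
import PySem

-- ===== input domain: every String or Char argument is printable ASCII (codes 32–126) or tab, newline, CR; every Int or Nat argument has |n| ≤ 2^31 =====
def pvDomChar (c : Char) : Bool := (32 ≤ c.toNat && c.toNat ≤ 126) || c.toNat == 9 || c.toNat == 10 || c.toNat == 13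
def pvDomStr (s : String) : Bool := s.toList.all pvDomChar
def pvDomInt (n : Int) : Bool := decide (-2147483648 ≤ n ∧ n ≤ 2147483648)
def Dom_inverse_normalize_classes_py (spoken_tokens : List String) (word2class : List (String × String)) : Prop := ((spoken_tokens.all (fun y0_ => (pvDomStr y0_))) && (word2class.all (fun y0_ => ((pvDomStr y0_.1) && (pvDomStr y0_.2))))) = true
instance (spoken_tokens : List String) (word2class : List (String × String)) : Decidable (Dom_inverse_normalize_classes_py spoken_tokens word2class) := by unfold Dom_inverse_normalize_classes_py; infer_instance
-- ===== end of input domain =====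

-- B replaces A's mask list + index/slice run-tracking helper + post-hoc mapping with one
-- backward pass that maps each token to its class at once, prepending to the head group or
-- starting a new group on a membership change (objective: alternative decomposition).

-- ===== PORT A =====
-- The 'for i, _ in enumerate(tokens)' loop of group_tokens, as structural recursion on i
-- with the same state (groups, start, value); 'value' is uninitialized in Python before the
-- first iteration and never read there (the 'if i:' guard), so it is passed in as 'false'.
-- Each singleton dict {value: tokens[start:i]} is ported as the pair (value, slice).
def pvGroupTokensLoop (tokens : List String) (mask : List Bool) (i : Nat)
    (groups : List (Bool × List String)) (start : Nat) (value : Bool) :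
    List (Bool × List String) × Nat × Bool :=
  if h : i < tokens.length then
    let gs :=
      if i ≠ 0 ∧ value ≠ PySem.List.pyGetD mask (i : Int) false then
        (groups ++ [(value, PySem.List.slice tokens (some (start : Int)) (some (i : Int)))], i)
      else (groups, start)
    pvGroupTokensLoop tokens mask (i + 1) gs.1 gs.2 (PySem.List.pyGetD mask (i : Int) false)
  else (groups, start, value)
termination_by tokens.length - i

def pvGroupTokens (tokens : List String) (mask : List Bool) : List (Bool × List String) :=
  let r := pvGroupTokensLoop tokens mask 0 [] 0 false
  if tokens ≠ [] then
    -- after the loop the Python variable i equals tokens.length - 1, so tokens[start : i + 1]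
    -- is the slice up to ((tokens.length - 1) + 1)
    r.1 ++ [(r.2.2, PySem.List.slice tokens (some ((r.2.1 : Int)))
              (some (((tokens.length - 1 + 1 : Nat) : Int))))]
  else r.1

def inverse_normalize_classes_py (spoken_tokens : List String) (word2class : List (String × String)) : List (List String) :=
  let d := PySem.Dict.ofList word2class
  let mask := spoken_tokens.map (fun token => if (d.get? token).isSome then true else false)
  let groups := pvGroupTokens spoken_tokens mask
  -- [word2class[t] for t in v] if k else [BACKGROUND_CLASS for _ in v]; the key t is always
  -- present when k is true (the run's mask is true), so the .getD "" default is never used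
  groups.map (fun kv =>
    if kv.1 then kv.2.map (fun t => (d.get? t).getD "")
    else kv.2.map (fun _ => "self"))

-- ===== PORT B =====
-- One step of Source B's 'for token in reversed(spoken_tokens)' loop: state is (groups, prev).
-- 'groups[0].insert(0, cls)' is only reached when prev is not None, where groups is nonempty,
-- so headD []/tail are exact there. The reversed loop is the foldr over the token list.
def pvStep (d : PySem.Dict String String) (t : String)
    (acc : List (List String) × Option Bool) : List (List String) × Option Bool :=
  let m := (d.get? t).isSome
  let cls := if m then (d.get? t).getD "" else "self"
  if some m = acc.2 then ((cls :: acc.1.headD []) :: acc.1.tail, some m)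
  else ([cls] :: acc.1, some m)

def inverse_normalize_classes_py_alt (spoken_tokens : List String) (word2class : List (String × String)) : List (List String) :=
  (spoken_tokens.foldr (pvStep (PySem.Dict.ofList word2class)) ([], none)).1

-- ===== PRECONDITION & SPEC =====
def Spec_inverse_normalize_classes_py (spoken_tokens : List String) (word2class : List (String × String)) (out : List (List String)) : Prop := out = inverse_normalize_classes_py_alt spoken_tokens word2class
instance (spoken_tokens : List String) (word2class : List (String × String)) (out : List (List String)) : Decidable (Spec_inverse_normalize_classes_py spoken_tokens word2class out) := by unfold Spec_inverse_normalize_classes_py; infer_instance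

-- ===== CLAIM (what is proved, stated in full; the proofs are below) =====
def Claim_equal_inverse_normalize_classes_py : Prop := ∀ (spoken_tokens : List String) (word2class : List (String × String)), Dom_inverse_normalize_classes_py spoken_tokens word2class → Spec_inverse_normalize_classes_py spoken_tokens word2class (inverse_normalize_classes_py spoken_tokens word2class)

-- ===== LEMMAS AND PROOFS =====

-- Proof-only middleman: the run decomposition (maximal membership runs, each mapped as a
-- block). Both ports are proved equal to it.
def pvAltGo (d : PySem.Dict String String) : List String → List (List String)
  | [] => []
  | t :: rest =>
    let m := (d.get? t).isSome
    let run := t :: rest.takeWhile (fun x => (d.get? x).isSome == m)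
    let rest' := rest.dropWhile (fun x => (d.get? x).isSome == m)
    (if m then run.map (fun x => (d.get? x).getD "") else run.map (fun _ => "self"))
      :: pvAltGo d rest'
termination_by l => l.length
decreasing_by
  exact Nat.lt_succ_of_le (List.length_dropWhile_le _ _)

theorem pvLoop_stop (tokens : List String) (mask : List Bool) (i : Nat)
    (groups : List (Bool × List String)) (start : Nat) (value : Bool)
    (h : ¬ i < tokens.length) :
    pvGroupTokensLoop tokens mask i groups start value = (groups, start, value) := by
  rw [pvGroupTokensLoop]; simp [h]

theorem pvLoop_acc_aux (tokens : List String) (mask : List Bool) :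
    ∀ k i, tokens.length - i ≤ k → ∀ groups start value,
      pvGroupTokensLoop tokens mask i groups start value =
        (groups ++ (pvGroupTokensLoop tokens mask i [] start value).1,
          (pvGroupTokensLoop tokens mask i [] start value).2) := by
  intro k
  induction k with
  | zero =>
    intro i hk groups start value
    have h : ¬ i < tokens.length := by omega
    rw [pvLoop_stop _ _ _ _ _ _ h, pvLoop_stop _ _ _ _ _ _ h]
    simp
  | succ k ih =>
    intro i hk groups start value
    by_cases h : i < tokens.length
    · rw [pvGroupTokensLoop]
      conv_rhs => rw [pvGroupTokensLoop]
      simp only [dif_pos h]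
      by_cases hc : i ≠ 0 ∧ value ≠ PySem.List.pyGetD mask (i : Int) false
      · simp only [if_pos hc, List.nil_append]
        rw [ih (i+1) (by omega) [(value, PySem.List.slice tokens (some (start:Int)) (some (i:Int)))]]
        rw [ih (i+1) (by omega) (groups ++ [(value, PySem.List.slice tokens (some (start:Int)) (some (i:Int)))])]
        simp
      · simp only [if_neg hc]
        rw [ih (i+1) (by omega)]
    · rw [pvLoop_stop _ _ _ _ _ _ h, pvLoop_stop _ _ _ _ _ _ h]
      simp

theorem pvLoop_acc (tokens : List String) (mask : List Bool) :
    ∀ i groups start value,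
      pvGroupTokensLoop tokens mask i groups start value =
        (groups ++ (pvGroupTokensLoop tokens mask i [] start value).1,
          (pvGroupTokensLoop tokens mask i [] start value).2) := by
  intro i
  exact pvLoop_acc_aux tokens mask tokens.length i (by omega)

theorem pvTakeDrop_aux (l : List String) (q : String → Bool) :
    ∀ k a i, i - a = k → a ≤ i → i ≤ l.length →
      (∀ j, a ≤ j → j < i → (hj : j < l.length) → q l[j] = true) →
      ((hi : i < l.length) → q l[i] = false) →
      (l.drop a).takeWhile q = (l.drop a).take (i - a) ∧
      (l.drop a).dropWhile q = l.drop i := by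
  intro k
  induction k with
  | zero =>
    intro a i hk hai hil h1 h2
    have hia : i = a := by omega
    subst hia
    by_cases h : i < l.length
    · rw [List.drop_eq_getElem_cons h]
      simp [h2 h, ← List.drop_eq_getElem_cons h]
    · have : l.drop i = [] := List.drop_eq_nil_of_le (by omega)
      simp [this]
  | succ k ih =>
    intro a i hk hai hil h1 h2
    have ha : a < l.length := by omega
    rw [List.drop_eq_getElem_cons ha]
    have hqa : q l[a] = true := h1 a (by omega) (by omega) ha
    have hrec := ih (a + 1) i (by omega) (by omega) hil
      (fun j hj1 hj2 hj3 => h1 j (by omega) hj2 hj3) h2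
    constructor
    · rw [List.takeWhile_cons, hqa]
      have : i - a = (i - (a + 1)) + 1 := by omega
      rw [this, List.take_succ_cons, hrec.1]
      simp
    · rw [List.dropWhile_cons, hqa]
      simpa using hrec.2

theorem pvTakeDrop (l : List String) (q : String → Bool) (a i : Nat)
    (hai : a ≤ i) (hil : i ≤ l.length)
    (h1 : ∀ j, a ≤ j → j < i → (hj : j < l.length) → q l[j] = true)
    (h2 : (hi : i < l.length) → q l[i] = false) :
    (l.drop a).takeWhile q = (l.drop a).take (i - a) ∧
    (l.drop a).dropWhile q = l.drop i :=
  pvTakeDrop_aux l q (i - a) a i rfl hai hil h1 h2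

def pvMask (d : PySem.Dict String String) (tokens : List String) : List Bool :=
  tokens.map (fun token => if (d.get? token).isSome then true else false)

def pvF (d : PySem.Dict String String) (kv : Bool × List String) : List String :=
  if kv.1 then kv.2.map (fun t => (d.get? t).getD "") else kv.2.map (fun _ => "self")

def pvFin (d : PySem.Dict String String) (tokens : List String)
    (r : List (Bool × List String) × Nat × Bool) : List (List String) :=
  (r.1 ++ [(r.2.2, PySem.List.slice tokens (some ((r.2.1 : Int)))
      (some (((tokens.length - 1 + 1 : Nat) : Int))))]).map (pvF d)

theorem pvMask_get (d : PySem.Dict String String) (tokens : List String) (i : Nat)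
    (hi : i < tokens.length) :
    PySem.List.pyGetD (pvMask d tokens) (i : Int) false = (d.get? tokens[i]).isSome := by
  simp [pvMask, List.getD_eq_getElem?_getD, List.getElem?_map, List.getElem?_eq_getElem hi]

theorem pvAltGo_nil (d : PySem.Dict String String) : pvAltGo d [] = [] := by
  rw [pvAltGo]

theorem pvAltGo_cons (d : PySem.Dict String String) (t : String) (rest : List String) :
    pvAltGo d (t :: rest) =
      (if (d.get? t).isSome then
        (t :: rest.takeWhile (fun x => (d.get? x).isSome == (d.get? t).isSome)).map
          (fun x => (d.get? x).getD "")
      else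
        (t :: rest.takeWhile (fun x => (d.get? x).isSome == (d.get? t).isSome)).map
          (fun _ => "self"))
      :: pvAltGo d (rest.dropWhile (fun x => (d.get? x).isSome == (d.get? t).isSome)) := by
  rw [pvAltGo]

theorem pvMain (tokens : List String) (d : PySem.Dict String String) :
    ∀ k i start value, tokens.length - i = k →
      1 ≤ i → i ≤ tokens.length → start < i →
      (∀ j, start ≤ j → j < i → (hj : j < tokens.length) → ((d.get? tokens[j]).isSome) = value) →
      pvFin d tokens (pvGroupTokensLoop tokens (pvMask d tokens) i [] start value) =
        pvAltGo d (tokens.drop start) := by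
  intro k
  induction k with
  | zero =>
    intro i start value hk h1i hil hsi hconst
    have hin : ¬ i < tokens.length := by omega
    have hs : start < tokens.length := by omega
    rw [pvLoop_stop _ _ _ _ _ _ hin]
    have hm : (d.get? tokens[start]).isSome = value := hconst start (by omega) (by omega) hs
    have htd := pvTakeDrop tokens (fun x => ((d.get? x).isSome == value)) (start + 1) tokens.length
      (by omega) (by omega)
      (fun j hj1 hj2 hj3 => by simp [hconst j (by omega) (by omega) hj3])
      (fun hi2 => absurd hi2 (by omega))
    have hlen1 : (tokens.drop (start+1)).length = tokens.length - (start+1) := by simp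
    have hlen0 : (tokens.drop start).length = tokens.length - start := by simp
    have hslice : PySem.List.slice tokens (some ((start : Int)))
        (some (((tokens.length - 1 + 1 : Nat) : Int))) = tokens.drop start := by
      rw [PySem.List.slice_natCast, show tokens.length - 1 + 1 = tokens.length from by omega,
        ← hlen0]
      exact List.take_length
    conv_rhs => rw [List.drop_eq_getElem_cons hs, pvAltGo_cons]
    rw [hm, htd.1, htd.2, ← hlen1, List.take_length, List.drop_length, pvAltGo_nil]
    simp only [pvFin, List.nil_append, List.map_cons, List.map_nil, hslice, pvF]
    rw [List.drop_eq_getElem_cons hs]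
    simp only [List.map_cons]
  | succ k ih =>
    intro i start value hk h1i hil hsi hconst
    have hi : i < tokens.length := by omega
    have hs : start < tokens.length := by omega
    rw [pvGroupTokensLoop]
    simp only [dif_pos hi, pvMask_get d tokens i hi]
    by_cases hb : (d.get? tokens[i]).isSome = value
    · have hcond : ¬ (i ≠ 0 ∧ value ≠ (d.get? tokens[i]).isSome) := by simp [hb]
      simp only [if_neg hcond]
      rw [hb]
      exact ih (i+1) start value (by omega) (by omega) (by omega) (by omega)
        (fun j hj1 hj2 hj3 => by
          rcases Nat.lt_or_ge j i with h | h
          · exact hconst j hj1 h hj3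
          · have hji : j = i := by omega
            subst hji; exact hb)
    · have hcond : (i ≠ 0 ∧ value ≠ (d.get? tokens[i]).isSome) := ⟨by omega, fun h => hb h.symm⟩
      simp only [if_pos hcond]
      rw [pvLoop_acc]
      simp only [List.nil_append]
      rw [show ([(value, PySem.List.slice tokens (some ((start:Int))) (some ((i:Int))))] ++
          (pvGroupTokensLoop tokens (pvMask d tokens) (i + 1) [] i ((d.get? tokens[i]).isSome)).1)
          = ((value, PySem.List.slice tokens (some ((start:Int))) (some ((i:Int)))) ::
          (pvGroupTokensLoop tokens (pvMask d tokens) (i + 1) [] i ((d.get? tokens[i]).isSome)).1) from rfl]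
      have hfin : ∀ (x : Bool × List String) g p, pvFin d tokens ((x :: g, p) :
            List (Bool × List String) × Nat × Bool) = pvF d x :: pvFin d tokens (g, p) := by
        intro x g p; simp [pvFin]
      rw [show ((((value, PySem.List.slice tokens (some ((start:Int))) (some ((i:Int)))) ::
          (pvGroupTokensLoop tokens (pvMask d tokens) (i + 1) [] i ((d.get? tokens[i]).isSome)).1),
          (pvGroupTokensLoop tokens (pvMask d tokens) (i + 1) [] i ((d.get? tokens[i]).isSome)).2) :
          List (Bool × List String) × Nat × Bool)
          = (((value, PySem.List.slice tokens (some ((start:Int))) (some ((i:Int)))) ::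
          (pvGroupTokensLoop tokens (pvMask d tokens) (i + 1) [] i ((d.get? tokens[i]).isSome)).1),
          (pvGroupTokensLoop tokens (pvMask d tokens) (i + 1) [] i ((d.get? tokens[i]).isSome)).2) from rfl]
      rw [hfin]
      rw [show ((pvGroupTokensLoop tokens (pvMask d tokens) (i + 1) [] i ((d.get? tokens[i]).isSome)).1,
          (pvGroupTokensLoop tokens (pvMask d tokens) (i + 1) [] i ((d.get? tokens[i]).isSome)).2)
          = pvGroupTokensLoop tokens (pvMask d tokens) (i + 1) [] i ((d.get? tokens[i]).isSome) from rfl]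
      rw [ih (i+1) i ((d.get? tokens[i]).isSome) (by omega) (by omega) (by omega) (by omega)
        (fun j hj1 hj2 hj3 => by simp only [show j = i from by omega])]
      have hm : (d.get? tokens[start]).isSome = value := hconst start (by omega) (by omega) hs
      have htd := pvTakeDrop tokens (fun x => ((d.get? x).isSome == value)) (start + 1) i
        (by omega) (by omega)
        (fun j hj1 hj2 hj3 => by simp [hconst j (by omega) (by omega) hj3])
        (fun hi2 => by simp [hb])
      conv_rhs => rw [List.drop_eq_getElem_cons hs, pvAltGo_cons]
      rw [hm, htd.1, htd.2]
      have hslice : PySem.List.slice tokens (some ((start : Int))) (some ((i : Int)))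
          = tokens[start] :: (tokens.drop (start+1)).take (i - (start+1)) := by
        rw [PySem.List.slice_natCast, List.drop_eq_getElem_cons hs,
          show i - start = (i - (start+1)) + 1 from by omega, List.take_succ_cons]
      rw [hslice, pvF]

theorem pvGroupTokens_nil (m : List Bool) : pvGroupTokens [] m = [] := by
  rw [pvGroupTokens]
  rw [pvLoop_stop _ _ _ _ _ _ (by simp)]
  simp

-- A's port equals the run decomposition.
theorem pvA_eq_runs (tokens : List String) (word2class : List (String × String)) :
    inverse_normalize_classes_py tokens word2class =
      pvAltGo (PySem.Dict.ofList word2class) tokens := by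
  show ((pvGroupTokens tokens (pvMask (PySem.Dict.ofList word2class) tokens)).map
      (pvF (PySem.Dict.ofList word2class))) = pvAltGo (PySem.Dict.ofList word2class) tokens
  cases tokens with
  | nil =>
    rw [pvAltGo_nil, pvGroupTokens_nil]
    simp
  | cons t ts =>
    rw [pvGroupTokens]
    have hne : (t :: ts) ≠ [] := by simp
    simp only [if_pos hne]
    have h0 : (0 : Nat) < (t :: ts).length := by simp
    rw [show (pvGroupTokensLoop (t :: ts) (pvMask (PySem.Dict.ofList word2class) (t :: ts)) 0 [] 0 false)
        = pvGroupTokensLoop (t :: ts) (pvMask (PySem.Dict.ofList word2class) (t :: ts)) 1 [] 0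
            (((PySem.Dict.ofList word2class).get? ((t :: ts)[0])).isSome) from by
      rw [pvGroupTokensLoop]
      simp only [dif_pos h0, pvMask_get _ _ 0 h0]
      simp]
    have := pvMain (t :: ts) (PySem.Dict.ofList word2class) ((t :: ts).length - 1) 1 0
      (((PySem.Dict.ofList word2class).get? ((t :: ts)[0])).isSome) rfl (by omega) (by simp) (by omega)
      (fun j hj1 hj2 hj3 => by simp only [show j = 0 from by omega])
    rw [List.drop_zero] at this
    exact this

-- B's foldr equals the run decomposition, with the second state component recording the
-- membership of the head token (None on the empty list).
theorem pvFold_eq (d : PySem.Dict String String) :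
    ∀ l : List String,
      l.foldr (pvStep d) ([], none) =
        (pvAltGo d l, l.head?.map (fun t => (d.get? t).isSome)) := by
  intro l
  induction l with
  | nil => simp [pvAltGo_nil]
  | cons t rest ih =>
    rw [List.foldr_cons, ih]
    cases rest with
    | nil =>
      rw [pvAltGo_cons d t []]
      by_cases hb : ((d.get? t).isSome : Bool)
      · simp [pvStep, hb, pvAltGo_nil]
      · simp [pvStep, hb, pvAltGo_nil]
    | cons r rs =>
      simp only [List.head?_cons, Option.map_some]
      by_cases hm : (d.get? t).isSome = (d.get? r).isSome
      · -- same membership: the token joins the head run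
        rw [pvAltGo_cons d t (r :: rs), pvAltGo_cons d r rs]
        by_cases hb : ((d.get? t).isSome : Bool)
        · simp [pvStep, hm, hm ▸ hb]
        · have hr : d.get? r = none := by
            have : (d.get? r).isSome = false := by rw [← hm]; simpa using hb
            simpa using this
          simp [pvStep, hm, hr]
      · -- membership change: a new singleton group is started
        rw [pvAltGo_cons d t (r :: rs)]
        have hne : ((d.get? r).isSome == (d.get? t).isSome) = false := by
          cases h1 : (d.get? t).isSome <;> cases h2 : (d.get? r).isSome <;> simp_all
        rw [List.takeWhile_cons, List.dropWhile_cons, hne]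
        by_cases hb : ((d.get? t).isSome : Bool)
        · have hr : (d.get? r).isSome = false := by
            cases h2 : (d.get? r).isSome <;> simp_all
          simp [pvStep, hb, hr]
        · have hr : (d.get? r).isSome = true := by
            cases h2 : (d.get? r).isSome <;> simp_all
          have hr' : ¬ d.get? r = none := by simp [← Option.isSome_iff_ne_none, hr]
          simp [pvStep, hb, hr]

theorem pv_spec :
    ∀ (spoken_tokens : List String) (word2class : List (String × String)),
      inverse_normalize_classes_py spoken_tokens word2class =
        inverse_normalize_classes_py_alt spoken_tokens word2class := by
  intro tokens word2class
  rw [pvA_eq_runs]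
  show pvAltGo (PySem.Dict.ofList word2class) tokens
      = (tokens.foldr (pvStep (PySem.Dict.ofList word2class)) ([], none)).1
  rw [pvFold_eq]

-- ===== VERDICT (by name: the statement is the Claim_ definition above) =====
theorem inverse_normalize_classes_py_spec : Claim_equal_inverse_normalize_classes_py := by
  intro spoken_tokens word2class _
  exact pv_spec spoken_tokens word2class
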